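-- pv_equiv track=rewrite | github.com/deepakraaaj/OpenMetaData | app/onboard/simple_flow.py | _group_tables
-- ===== SOURCE A (Python) =====
-- from collections import defaultdict
--
-- def _group_tables(table_names: list[str], categories: dict[str, str]) -> dict[str, list[str]]:
--     grouped: dict[str, list[str]] = defaultdict(list)
--     for table_name in sorted(table_names):
--         category = categories.get(table_name)
--         if not category:
--             continue
--         grouped[category].append(table_name)
--     return {category: names for category, names in sorted(grouped.items())}
-- ===== SOURCE B (Python) =====
-- def _group_tables(table_names: list[str], categories: dict[str, str]) -> dict[str, list[str]]:
--     # Tag-sort-split: build (category, name) pairs, sort the pair list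
--     # lexicographically once, then cut it into runs of equal category.
--     pairs = sorted((categories[name], name) for name in table_names if categories.get(name))
--     result: dict[str, list[str]] = {}
--     while pairs:
--         cat = pairs[0][0]
--         k = 1
--         while k < len(pairs) and pairs[k][0] == cat:
--             k += 1
--         result[cat] = [name for _, name in pairs[:k]]
--         pairs = pairs[k:]
--     return result
-- ===== Notes on version B (the rewrite author's own statement) =====
-- stated objective: alternative
-- what changed: B uses no dict-based grouping at all: it tags each kept name with its category, sorts the (category, name) pair list lexicographically in one pass, and then splits the sorted list into runs of equal category to form the result.
import Mathlib
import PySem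

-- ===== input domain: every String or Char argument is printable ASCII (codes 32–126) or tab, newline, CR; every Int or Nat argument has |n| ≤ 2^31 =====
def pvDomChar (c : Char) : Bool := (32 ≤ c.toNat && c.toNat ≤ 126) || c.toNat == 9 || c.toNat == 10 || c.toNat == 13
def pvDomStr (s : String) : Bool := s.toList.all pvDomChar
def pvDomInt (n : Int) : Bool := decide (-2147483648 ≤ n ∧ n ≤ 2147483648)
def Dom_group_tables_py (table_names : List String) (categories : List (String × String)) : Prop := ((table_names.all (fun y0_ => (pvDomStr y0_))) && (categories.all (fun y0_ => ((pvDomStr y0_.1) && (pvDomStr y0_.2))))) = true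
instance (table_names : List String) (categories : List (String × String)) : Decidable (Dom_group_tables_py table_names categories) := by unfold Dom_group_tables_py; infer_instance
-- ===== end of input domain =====

-- B replaces A's dict-based grouping by tag-sort-split: it sorts the (category, name)
-- pair list lexicographically once and cuts it into runs of equal category
-- (objective: alternative algorithm, same observable result).

-- ===== PORT A =====
def group_tables_py (table_names : List String) (categories : List (String × String)) : List (String × List String) :=
  let cats : PySem.Dict String String := PySem.Dict.ofList categories
  let grouped : PySem.Dict String (List String) :=
    (PySem.List.sorted table_names (fun x => x) false).foldl
      (fun d name =>
        match cats.get? name with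
        | none => d
        | some c => if c = "" then d else d.modify c [] (· ++ [name]))
      PySem.Dict.empty
  -- sorted(grouped.items()): dict keys are distinct, so Python's tuple comparison
  -- never reaches the second components — it is exactly a sort by the key.
  PySem.List.sorted grouped.items (fun p => p.1) false

-- ===== PORT B =====
-- the two nested while loops of Source B: cut the sorted pair list into maximal runs of
-- equal first component (the inner index scan k IS takeWhile/dropWhile of that run)
def pvSplitRuns : List (String × String) → List (String × List String)
  | [] => []
  | p :: rest =>
      let run := (p :: rest).takeWhile (fun q => q.1 == p.1)
      let rest' := (p :: rest).dropWhile (fun q => q.1 == p.1)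
      (p.1, run.map Prod.snd) :: pvSplitRuns rest'
termination_by l => l.length
decreasing_by
  simp only [List.dropWhile_cons, beq_self_eq_true, if_pos]
  exact Nat.lt_succ_of_le (List.length_dropWhile_le _ _)

def group_tables_py_alt (table_names : List String) (categories : List (String × String)) : List (String × List String) :=
  let cats : PySem.Dict String String := PySem.Dict.ofList categories
  -- pairs = sorted((categories[name], name) for name in table_names if categories.get(name));
  -- categories[name] is only evaluated for kept names, where get? is some, so getD "" is exact;
  -- Python's sort of 2-tuples is sorted2 with the two component keys
  let kept := table_names.filter (fun n => match cats.get? n with | none => false | some c => c != "")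
  let pairs := PySem.List.sorted2 (kept.map (fun n => ((cats.get? n).getD "", n))) Prod.fst Prod.snd false
  pvSplitRuns pairs

-- ===== PRECONDITION & SPEC =====
def Spec_group_tables_py (table_names : List String) (categories : List (String × String)) (out : List (String × List String)) : Prop := out = group_tables_py_alt table_names categories
instance (table_names : List String) (categories : List (String × String)) (out : List (String × List String)) : Decidable (Spec_group_tables_py table_names categories out) := by unfold Spec_group_tables_py; infer_instance

-- ===== CLAIM (what is proved, stated in full; the proofs are below) =====
def Claim_equal_group_tables_py : Prop := ∀ (table_names : List String) (categories : List (String × String)), Dom_group_tables_py table_names categories → Spec_group_tables_py table_names categories (group_tables_py table_names categories)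

-- ===== LEMMAS AND PROOFS =====

-- proof-side helpers: which names are kept and into which bucket they go
def pvKeep (cats : PySem.Dict String String) (n : String) : Bool :=
  match cats.get? n with
  | none => false
  | some c => c != ""

def pvCat (cats : PySem.Dict String String) (n : String) : String :=
  (cats.get? n).getD ""

def pvSel (cats : PySem.Dict String String) (c : String) (n : String) : Bool :=
  pvKeep cats n && (pvCat cats n == c)

-- the distinct categories and the canonical result both programs produce
def pvKeys (cats : PySem.Dict String String) (L : List String) : List String :=
  PySem.Set.ofList ((L.filter (pvKeep cats)).map (pvCat cats))

def pvBlocks (cats : PySem.Dict String String) (L : List String) : List (String × List String) :=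
  (PySem.List.sorted (pvKeys cats L) (fun x => x) false).map
    (fun c => (c, PySem.List.sorted (L.filter (pvSel cats c)) (fun x => x) false))

def pvPairs (cats : PySem.Dict String String) (L : List String) : List (String × String) :=
  (L.filter (pvKeep cats)).map (fun n => (pvCat cats n, n))

-- ---------- A-side ----------

-- the shared loop body, rewritten as a uniform modify-fold over (category, name) pairs
theorem pv_bucket_eq (cats : PySem.Dict String String) (L : List String)
    (d : PySem.Dict String (List String)) :
    L.foldl
      (fun d name =>
        match cats.get? name with
        | none => d
        | some c => if c = "" then d else d.modify c [] (· ++ [name])) d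
    = (pvPairs cats L).foldl (fun d p => d.modify p.1 [] (· ++ [p.2])) d := by
  unfold pvPairs
  induction L generalizing d with
  | nil => rfl
  | cons x t ih =>
    cases h : cats.get? x with
    | none => simp [pvKeep, h, ih]
    | some c =>
      by_cases hc : c = ""
      · simp [pvKeep, h, hc, ih]
      · simp [pvKeep, pvCat, h, hc, ih, bne_iff_ne]

-- the bucket of category c is the kept names from L, in L's order
theorem pv_getD_bucket (cats : PySem.Dict String String) (L : List String) (c : String) :
    ((pvPairs cats L).foldl (fun d p => d.modify p.1 [] (· ++ [p.2])) PySem.Dict.empty).getD c []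
    = L.filter (pvSel cats c) := by
  unfold pvPairs
  rw [PySem.Dict.getD_foldl_modify_append]
  simp [List.filter_map, List.filter_filter, Function.comp_def]
  exact List.filter_congr (fun a _ => by simp [pvSel, Bool.and_comm])

-- the key set of the bucket dict built from L
theorem pv_keys_bucket (cats : PySem.Dict String String) (L : List String) :
    ((pvPairs cats L).foldl (fun d p => d.modify p.1 [] (· ++ [p.2])) PySem.Dict.empty).keys
    = PySem.Set.ofList ((L.filter (pvKeep cats)).map (pvCat cats)) := by
  unfold pvPairs
  refine (PySem.Dict.keys_foldl_modify_key _ (fun p => (p : String × String).1) ([] : List String) (fun _ p xs => xs ++ [p.2]) PySem.Dict.empty).trans ?_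
  simp [PySem.Set.update, PySem.Set.ofList_eq_foldl, PySem.Dict.empty, List.map_map, Function.comp_def]

theorem pv_nodup_keys_bucket (cats : PySem.Dict String String) (L : List String) :
    ((pvPairs cats L).foldl (fun d p => d.modify p.1 [] (· ++ [p.2])) PySem.Dict.empty).keys.Nodup := by
  exact PySem.Dict.nodup_keys_foldl_modify_key _ (fun p => (p : String × String).1) ([] : List String) (fun _ p xs => xs ++ [p.2]) PySem.Dict.empty (by simp [PySem.Dict.empty])

-- filtering commutes with sorting (strings, identity key)
theorem pv_filter_sorted (L : List String) (P : String → Bool) :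
    (PySem.List.sorted L (fun x => x) false).filter P
    = PySem.List.sorted (L.filter P) (fun x => x) false := by
  symm
  apply PySem.List.sorted_id_eq_of_perm_of_pairwise
  · exact (PySem.List.sorted_perm L (fun x => x) false).filter P
  · exact (PySem.List.sorted_pairwise L (fun x => x)).filter P

-- the two key sets (from the pre-sorted and from the raw list) are permutations
theorem pv_keys_perm (cats : PySem.Dict String String) (L : List String) :
    (PySem.Set.ofList (((PySem.List.sorted L (fun x => x) false).filter (pvKeep cats)).map (pvCat cats))).Perm
      (pvKeys cats L) := by
  unfold pvKeys
  rw [List.perm_ext_iff_of_nodup (PySem.Set.nodup_ofList _) (PySem.Set.nodup_ofList _)]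
  intro a
  have h : ((PySem.List.sorted L (fun x => x) false).filter (pvKeep cats)).Perm (L.filter (pvKeep cats)) :=
    (PySem.List.sorted_perm L (fun x => x) false).filter _
  simp [PySem.Set.mem_ofList, (h.map (pvCat cats)).mem_iff]

-- sorting a nodup-keyed items list by the key lists it in sorted-key order
theorem pv_sorted_items (d : PySem.Dict String (List String)) (h : d.keys.Nodup) :
    PySem.List.sorted d.items (fun p => p.1) false
    = (PySem.List.sorted d.keys (fun x => x) false).map (fun c => (c, d.getD c [])) := by
  apply PySem.List.sorted_eq_of_perm_of_pairwise_lt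
  · have hitems : d.items = d.keys.map (fun k => (k, d.getD k [])) :=
      PySem.Dict.items_eq_map_keys d h []
    rw [hitems]
    exact (PySem.List.sorted_perm d.keys (fun x => x) false).map _
  · have hle : (PySem.List.sorted d.keys (fun x => x) false).Pairwise (· ≤ ·) :=
      PySem.List.sorted_pairwise d.keys (fun x => x)
    have hnd : (PySem.List.sorted d.keys (fun x => x) false).Nodup :=
      ((PySem.List.sorted_perm d.keys (fun x => x) false).nodup_iff).mpr h
    rw [List.pairwise_map]
    exact (hle.and hnd).imp (fun hab => lt_of_le_of_ne hab.1 hab.2)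

-- A computes the canonical blocks
theorem pv_A_eq_blocks (L : List String) (cats : List (String × String)) :
    group_tables_py L cats = pvBlocks (PySem.Dict.ofList cats) L := by
  simp only [group_tables_py, pvBlocks]
  rw [pv_bucket_eq, pv_sorted_items _ (pv_nodup_keys_bucket _ _), pv_keys_bucket]
  rw [PySem.List.sorted_eq_sorted_of_perm _ _ _ (fun a b h => h) (pv_keys_perm _ _)]
  apply List.map_congr_left
  intro c _
  rw [pv_getD_bucket, pv_filter_sorted]

-- ---------- B-side ----------

-- Python's lexicographic sort of 2-tuples is the single-key sort under toLex
theorem pv_sorted2_eq_sorted_lex (ps : List (String × String)) :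
    PySem.List.sorted2 ps Prod.fst Prod.snd false
      = PySem.List.sorted ps (fun p => toLex p) false := by
  rw [PySem.List.sorted_eq_foldl_insertBy]
  have h : (fun (a b : String × String) => decide (a.1 < b.1) || (!decide (b.1 < a.1) && decide (a.2 < b.2)))
      = (fun (a b : String × String) => decide (toLex a < toLex b)) := by
    funext a b
    rcases lt_trichotomy a.1 b.1 with h1 | h1 | h1
    · simp [h1, asymm h1, Prod.Lex.toLex_lt_toLex]
    · simp [h1, Prod.Lex.toLex_lt_toLex]
    · have h2 : ¬ a.1 < b.1 := asymm h1
      have h3 : a.1 ≠ b.1 := ne_of_gt h1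
      simp only [Prod.Lex.toLex_lt_toLex]
      rw [decide_eq_false h2, decide_eq_true h1]
      simp [h2, h3]
  show ps.foldl (fun acc x => PySem.List.insertBy (fun a b => decide (a.1 < b.1) || (!decide (b.1 < a.1) && decide (a.2 < b.2))) x acc) [] = _
  rw [h]

-- the pairs carrying category c are exactly the selected names, tagged with c
theorem pv_filter_pairs (cats : PySem.Dict String String) (L : List String) (c : String) :
    (pvPairs cats L).filter (fun p => p.1 == c)
      = (L.filter (pvSel cats c)).map (fun n => (c, n)) := by
  unfold pvPairs
  rw [List.filter_map, List.filter_filter]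
  have h1 : L.filter (fun n => ((fun p : String × String => p.1 == c) ∘ fun n => (pvCat cats n, n)) n && pvKeep cats n)
      = L.filter (pvSel cats c) :=
    List.filter_congr (fun a _ => by simp [pvSel, Bool.and_comm])
  rw [h1]
  apply List.map_congr_left
  intro n hn
  have := (List.mem_filter.mp hn).2
  simp [pvSel] at this
  simp [this.2]

-- pointwise permutations lift to flatMap
theorem pv_flatMap_perm {α β : Type} (l : List α) (f g : α → List β)
    (h : ∀ a ∈ l, (f a).Perm (g a)) : (l.flatMap f).Perm (l.flatMap g) := by
  induction l with
  | nil => exact List.Perm.refl _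
  | cons x t ih =>
    simp only [List.flatMap_cons]
    exact (h x (by simp)).append (ih (fun a ha => h a (by simp [ha])))

-- partitioning a pair list by its (covering, duplicate-free) keys is a permutation
theorem pv_partition_perm (ps : List (String × String)) (K : List String)
    (hnd : K.Nodup) (hcov : ∀ p ∈ ps, p.1 ∈ K) :
    (K.flatMap (fun c => ps.filter (fun p => p.1 == c))).Perm ps := by
  induction K generalizing ps with
  | nil =>
    cases ps with
    | nil => exact List.Perm.refl _
    | cons p t => exact absurd (hcov p (by simp)) (by simp)
  | cons c K' ih =>
    simp only [List.flatMap_cons]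
    have hstep : ∀ c' ∈ K', ps.filter (fun p => p.1 == c')
        = (ps.filter (fun p => !(p.1 == c))).filter (fun p => p.1 == c') := by
      intro c' hc'
      rw [List.filter_filter]
      refine (List.filter_congr (fun p _ => ?_)).symm
      by_cases hp : p.1 = c'
      · have : c' ≠ c := fun he => (List.nodup_cons.mp hnd).1 (he ▸ hc')
        simp [hp, this]
      · simp [hp]
    rw [List.flatMap_congr hstep]
    have hcov' : ∀ p ∈ ps.filter (fun p => !(p.1 == c)), p.1 ∈ K' := by
      intro p hp
      obtain ⟨hps, hne⟩ := List.mem_filter.mp hp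
      rcases List.mem_cons.mp (hcov p hps) with h | h
      · simp [h] at hne
      · exact h
    exact ((ih _ (List.nodup_cons.mp hnd).2 hcov').append_left _).trans
      (List.filter_append_perm (fun p => p.1 == c) ps)

-- the flattened canonical blocks: all kept pairs, lexicographically ordered
def pvFlat (cats : PySem.Dict String String) (L : List String) : List (String × String) :=
  (pvBlocks cats L).flatMap (fun b => b.2.map (fun n => (b.1, n)))

theorem pv_flat_perm (cats : PySem.Dict String String) (L : List String) :
    (pvFlat cats L).Perm (pvPairs cats L) := by
  unfold pvFlat pvBlocks
  rw [List.flatMap_map]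
  refine (pv_flatMap_perm _ _ (fun c => (pvPairs cats L).filter (fun p => p.1 == c)) ?_).trans
    (pv_partition_perm (pvPairs cats L) _ ?_ ?_)
  · intro c _
    dsimp only
    rw [pv_filter_pairs]
    exact (PySem.List.sorted_perm (L.filter (pvSel cats c)) (fun x => x) false).map _
  · exact ((PySem.List.sorted_perm (pvKeys cats L) (fun x => x) false).nodup_iff).mpr
      (PySem.Set.nodup_ofList _)
  · intro p hp
    rw [PySem.List.mem_sorted]
    unfold pvPairs at hp
    obtain ⟨n, hn, rfl⟩ := List.mem_map.mp hp
    exact (PySem.Set.mem_ofList _ _).mpr (List.mem_map.mpr ⟨n, hn, rfl⟩)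

theorem pv_flat_pairwise (cats : PySem.Dict String String) (L : List String) :
    (pvFlat cats L).Pairwise (fun a b => toLex a ≤ toLex b) := by
  unfold pvFlat
  rw [List.pairwise_flatMap]
  constructor
  · intro b hb
    rw [List.pairwise_map]
    unfold pvBlocks at hb
    obtain ⟨c, _, rfl⟩ := List.mem_map.mp hb
    refine (PySem.List.sorted_pairwise (L.filter (pvSel cats c)) (fun x => x)).imp ?_
    intro n1 n2 h
    exact Prod.Lex.toLex_le_toLex.mpr (Or.inr ⟨rfl, h⟩)
  · unfold pvBlocks
    rw [List.pairwise_map]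
    refine (PySem.List.sorted_ofList_pairwise_lt _).imp ?_
    intro c1 c2 hc x hx y hy
    obtain ⟨n1, _, rfl⟩ := List.mem_map.mp hx
    obtain ⟨n2, _, rfl⟩ := List.mem_map.mp hy
    exact Prod.Lex.toLex_le_toLex.mpr (Or.inl hc)

theorem pv_sorted_pairs_eq_flat (cats : PySem.Dict String String) (L : List String) :
    PySem.List.sorted (pvPairs cats L) (fun p => toLex p) false = pvFlat cats L := by
  refine PySem.List.eq_of_perm_of_pairwise_le_of_injective (fun p => toLex p) toLex.injective
    ((PySem.List.sorted_perm _ _ false).trans (pv_flat_perm cats L).symm) ?_ (pv_flat_pairwise cats L)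
  exact PySem.List.sorted_pairwise _ _

-- one unfolding step of the run splitter
theorem pvSplitRuns_cons (p : String × String) (rest : List (String × String)) :
    pvSplitRuns (p :: rest)
      = (p.1, ((p :: rest).takeWhile (fun q => q.1 == p.1)).map Prod.snd)
        :: pvSplitRuns ((p :: rest).dropWhile (fun q => q.1 == p.1)) := by
  rw [pvSplitRuns]

-- splitting the concatenation of nonempty blocks with strictly increasing keys
-- recovers exactly the blocks
theorem pv_splitRuns_flat (bs : List (String × List String))
    (hne : ∀ b ∈ bs, b.2 ≠ [])
    (hlt : bs.Pairwise (fun a b => a.1 < b.1)) :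
    pvSplitRuns (bs.flatMap (fun b => b.2.map (fun n => (b.1, n)))) = bs := by
  induction bs with
  | nil => rw [List.flatMap_nil, pvSplitRuns]
  | cons b bs' ih =>
    obtain ⟨c, ns⟩ := b
    have hgt : ∀ q ∈ bs'.flatMap (fun b => b.2.map (fun n => (b.1, n))), ¬ ((q : String × String).1 == c) = true := by
      intro q hq
      obtain ⟨b', hb', hq'⟩ := List.mem_flatMap.mp hq
      obtain ⟨n', _, rfl⟩ := List.mem_map.mp hq'
      have : c < b'.1 := (List.pairwise_cons.mp hlt).1 b' hb'
      simp [ne_of_gt this]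
    have htw : (bs'.flatMap (fun b => b.2.map (fun n => (b.1, n)))).takeWhile
        (fun q => q.1 == c) = [] := by
      cases hrest : bs'.flatMap (fun b => b.2.map (fun n => (b.1, n))) with
      | nil => rfl
      | cons q t =>
        have := hgt q (by rw [hrest]; simp)
        simp [Bool.eq_false_iff.mpr this]
    have hdw : (bs'.flatMap (fun b => b.2.map (fun n => (b.1, n)))).dropWhile
        (fun q => q.1 == c) = bs'.flatMap (fun b => b.2.map (fun n => (b.1, n))) := by
      cases hrest : bs'.flatMap (fun b => b.2.map (fun n => (b.1, n))) with
      | nil => rfl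
      | cons q t =>
        have := hgt q (by rw [hrest]; simp)
        simp [Bool.eq_false_iff.mpr this]
    cases ns with
    | nil => exact absurd rfl (hne (c, []) (by simp))
    | cons n ns' =>
      simp only [List.flatMap_cons, List.map_cons, List.cons_append]
      rw [pvSplitRuns_cons]
      have hall : ∀ q ∈ ns'.map (fun n => (c, n)), ((q : String × String).1 == c) = true := by
        intro q hq
        obtain ⟨n', _, rfl⟩ := List.mem_map.mp hq
        simp
      simp only [List.takeWhile_cons, List.dropWhile_cons, beq_self_eq_true, if_pos]
      rw [List.takeWhile_append_of_pos hall, List.dropWhile_append_of_pos hall, htw, hdw]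
      refine congrArg₂ List.cons ?_ (ih (fun b hb => hne b (by simp [hb])) (List.pairwise_cons.mp hlt).2)
      simp [List.map_map, Function.comp_def]

-- B computes the canonical blocks
theorem pv_B_eq_blocks (L : List String) (cats : List (String × String)) :
    group_tables_py_alt L cats = pvBlocks (PySem.Dict.ofList cats) L := by
  show pvSplitRuns (PySem.List.sorted2 (pvPairs (PySem.Dict.ofList cats) L) Prod.fst Prod.snd false) = _
  rw [pv_sorted2_eq_sorted_lex, pv_sorted_pairs_eq_flat]
  unfold pvFlat
  refine pv_splitRuns_flat _ ?_ ?_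
  · intro b hb
    unfold pvBlocks at hb
    obtain ⟨c, hc, rfl⟩ := List.mem_map.mp hb
    rw [PySem.List.mem_sorted] at hc
    obtain ⟨x, hx, hcx⟩ := List.mem_map.mp ((PySem.Set.mem_ofList _ _).mp hc)
    obtain ⟨hxL, hkeep⟩ := List.mem_filter.mp hx
    have hmem : x ∈ L.filter (pvSel (PySem.Dict.ofList cats) c) :=
      List.mem_filter.mpr ⟨hxL, by simp [pvSel, hkeep, hcx]⟩
    simp only [ne_eq, PySem.List.sorted_eq_nil_iff]
    exact List.ne_nil_of_mem hmem
  · unfold pvBlocks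
    rw [List.pairwise_map]
    exact (PySem.List.sorted_ofList_pairwise_lt _).imp (fun h => h)

-- ===== VERDICT (by name: the statement is the Claim_ definition above) =====
theorem group_tables_py_spec : Claim_equal_group_tables_py := by
  intro L cats _
  unfold Spec_group_tables_py
  rw [pv_A_eq_blocks, pv_B_eq_blocks]
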